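-- pv_equiv track=rewrite | github.com/SimeonChifligarov/Alpha_Judge_Softuni | Python_Fundamentals/Python_Fundamentals/02_02_Data_Types_and_Variables_Exercise/08_Party_Profit_v2.py | calculate_coins
-- ===== SOURCE A (Python) =====
-- def calculate_coins(group_size: int, days: int) -> str:
--     coins = 0
--     companions = group_size
--
--     for day in range(1, days + 1):
--         if day % 10 == 0:
--             companions -= 2
--
--         if day % 15 == 0:
--             companions += 5
--
--         coins += 50
--         coins -= 2 * companions
--
--         if day % 3 == 0:
--             coins -= 3 * companions
--
--         if day % 5 == 0:
--             coins += 20 * companions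
--             if day % 3 == 0:
--                 coins -= 2 * companions
--
--     coins_per_companion = coins // companions
--     return f'{companions} companions received {coins_per_companion} coins each.'
-- ===== SOURCE B (Python) =====
-- def calculate_coins(group_size: int, days: int) -> str:
--     # Closed form: companions on day d = group_size - 2*(d//10) + 5*(d//15); everything is
--     # periodic with period 30, so sum full 30-day blocks arithmetically and only loop over
--     # the (< 30 day) remainder.  SC / SCP are the per-block coefficient sums (precomputed).
--     n = days if days > 0 else 0
--     K, r = divmod(n, 30)
--     SC, SCP = 26, 55
--     coins = 50 * n + K * (SC * group_size + SCP) + 2 * SC * K * (K - 1)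
--     for j in range(1, r + 1):
--         c = -2 + (-3 if j % 3 == 0 else 0) + (20 if j % 5 == 0 else 0) + (-2 if j % 15 == 0 else 0)
--         coins += c * (group_size + 4 * K - 2 * (j // 10) + 5 * (j // 15))
--     companions = group_size + 4 * K - 2 * (r // 10) + 5 * (r // 15)
--     return f'{companions} companions received {coins // companions} coins each.'
-- ===== Notes on version B (the rewrite author's own statement) =====
-- stated objective: faster
-- what changed: B replaces the per-day simulation loop with a closed-form summation: companion count on day d is group_size - 2*(d//10) + 5*(d//15), everything is 30-day periodic, so B adds an arithmetic-series formula for full 30-day blocks and loops only over the <30-day remainder; Pre_ only excludes the inputs where the final companion count is 0, on which A raises ZeroDivisionError.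
import Mathlib
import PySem

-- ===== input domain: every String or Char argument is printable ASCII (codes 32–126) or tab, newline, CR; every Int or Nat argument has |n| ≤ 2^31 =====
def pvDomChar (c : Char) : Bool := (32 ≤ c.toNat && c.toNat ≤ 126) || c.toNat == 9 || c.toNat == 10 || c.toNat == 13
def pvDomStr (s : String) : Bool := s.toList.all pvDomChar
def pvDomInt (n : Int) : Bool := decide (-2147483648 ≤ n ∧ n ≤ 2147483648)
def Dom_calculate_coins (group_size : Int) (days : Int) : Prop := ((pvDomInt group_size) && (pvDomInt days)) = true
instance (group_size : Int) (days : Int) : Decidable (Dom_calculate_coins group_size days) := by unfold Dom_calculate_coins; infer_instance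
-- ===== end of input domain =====

-- B replaces A's O(days) per-day simulation with an O(1) closed form: full 30-day blocks are
-- summed by an arithmetic-series formula and only the (< 30 day) remainder is looped over.

-- ===== PORT A =====
-- one iteration of A's for-loop; state = (coins, companions)
def pvStepA (s : Int × Int) (day : Int) : Int × Int :=
  let companions := if PySem.Int.mod day 10 = 0 then s.2 - 2 else s.2
  let companions := if PySem.Int.mod day 15 = 0 then companions + 5 else companions
  let coins := s.1 + 50
  let coins := coins - 2 * companions
  let coins := if PySem.Int.mod day 3 = 0 then coins - 3 * companions else coins
  let coins :=
    if PySem.Int.mod day 5 = 0 then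
      let coins := coins + 20 * companions
      if PySem.Int.mod day 3 = 0 then coins - 2 * companions else coins
    else coins
  (coins, companions)

def calculate_coins (group_size : Int) (days : Int) : String :=
  let st := (PySem.List.pyRange 1 (days + 1)).foldl pvStepA (0, group_size)
  let coins_per_companion := PySem.Int.floordiv st.1 st.2
  PySem.Int.toStr st.2 ++ " companions received " ++ PySem.Int.toStr coins_per_companion ++ " coins each."

-- ===== PORT B =====
-- per-day coin coefficient (Source B's expression for c)
def pvCoeffB (j : Int) : Int :=
  -2 + (if PySem.Int.mod j 3 = 0 then -3 else 0) + (if PySem.Int.mod j 5 = 0 then 20 else 0)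
     + (if PySem.Int.mod j 15 = 0 then -2 else 0)

def calculate_coins_alt (group_size : Int) (days : Int) : String :=
  let n := if days > 0 then days else 0
  let K := PySem.Int.floordiv n 30
  let r := PySem.Int.mod n 30
  let SC : Int := 26
  let SCP : Int := 55
  let coins := 50 * n + K * (SC * group_size + SCP) + 2 * SC * K * (K - 1)
  let coins := (PySem.List.pyRange 1 (r + 1)).foldl
    (fun c j => c + pvCoeffB j *
      (group_size + 4 * K - 2 * PySem.Int.floordiv j 10 + 5 * PySem.Int.floordiv j 15)) coins
  let companions := group_size + 4 * K - 2 * PySem.Int.floordiv r 10 + 5 * PySem.Int.floordiv r 15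
  PySem.Int.toStr companions ++ " companions received " ++
    PySem.Int.toStr (PySem.Int.floordiv coins companions) ++ " coins each."

-- ===== PRECONDITION & SPEC =====
-- Pre_ excludes exactly the inputs where the final companion count is 0: there Python A
-- raises ZeroDivisionError (and Python B does too).
def Pre_calculate_coins (group_size : Int) (days : Int) : Prop :=
  (if 0 < days then
      group_size - 2 * PySem.Int.floordiv days 10 + 5 * PySem.Int.floordiv days 15
    else group_size) ≠ 0

instance (group_size : Int) (days : Int) : Decidable (Pre_calculate_coins group_size days) := by
  unfold Pre_calculate_coins; infer_instance

def pvWitness_calculate_coins : Int × Int := (5, 7)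

def Spec_calculate_coins (group_size : Int) (days : Int) (out : String) : Prop :=
  out = calculate_coins_alt group_size days
instance (group_size : Int) (days : Int) (out : String) :
    Decidable (Spec_calculate_coins group_size days out) := by
  unfold Spec_calculate_coins; infer_instance

-- ===== CLAIM (what is proved, stated in full; the proofs are below) =====
def Claim_equal_calculate_coins : Prop := ∀ (group_size : Int) (days : Int),
  Dom_calculate_coins group_size days → Pre_calculate_coins group_size days →
  Spec_calculate_coins group_size days (calculate_coins group_size days)

-- ===== LEMMAS AND PROOFS =====

-- companions after n days of A's loop
def pvCompF (n : Nat) (g : Int) : Int := g - 2 * ((n / 10 : Nat) : Int) + 5 * ((n / 15 : Nat) : Int)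

-- coins after n days of A's loop, as a day-by-day recursion
def pvCoinsR : Nat → Int → Int
  | 0, _ => 0
  | n + 1, g => pvCoinsR n g + 50 + pvCoeffB ((n : Int) + 1) * pvCompF (n + 1) g

-- B's remainder-loop sum
def pvRsum : Nat → Int → Int → Int
  | 0, _, _ => 0
  | r + 1, K, g => pvRsum r K g + pvCoeffB ((r : Int) + 1) *
      (g + 4 * K - 2 * (((r + 1) / 10 : Nat) : Int) + 5 * (((r + 1) / 15 : Nat) : Int))

lemma pvCoeffB_congr (a b : Int) (h3 : 3 ∣ a ↔ 3 ∣ b) (h5 : 5 ∣ a ↔ 5 ∣ b) :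
    pvCoeffB a = pvCoeffB b := by
  unfold pvCoeffB
  simp only [PySem.Int.mod_eq_zero_iff_dvd]
  have h15 : (15 : Int) ∣ a ↔ 15 ∣ b := by
    constructor <;> intro h <;> omega
  rw [if_congr h3 rfl rfl, if_congr h5 rfl rfl, if_congr h15 rfl rfl]

lemma pvStepA_eq (n : Nat) (g : Int) :
    pvStepA (pvCoinsR n g, pvCompF n g) ((n : Int) + 1)
      = (pvCoinsR (n + 1) g, pvCompF (n + 1) g) := by
  simp only [pvStepA, pvCoinsR, pvCompF, pvCoeffB]
  have hc : (if PySem.Int.mod ((n : Int) + 1) 15 = 0 then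
        (if PySem.Int.mod ((n : Int) + 1) 10 = 0 then
          g - 2 * ((n / 10 : Nat) : Int) + 5 * ((n / 15 : Nat) : Int) - 2
         else g - 2 * ((n / 10 : Nat) : Int) + 5 * ((n / 15 : Nat) : Int)) + 5
      else (if PySem.Int.mod ((n : Int) + 1) 10 = 0 then
          g - 2 * ((n / 10 : Nat) : Int) + 5 * ((n / 15 : Nat) : Int) - 2
         else g - 2 * ((n / 10 : Nat) : Int) + 5 * ((n / 15 : Nat) : Int)))
      = g - 2 * (((n + 1) / 10 : Nat) : Int) + 5 * (((n + 1) / 15 : Nat) : Int) := by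
    simp only [PySem.Int.mod_eq_zero_iff_dvd]
    split_ifs <;> push_cast <;> omega
  rw [hc]; clear hc
  generalize pvCoinsR n g = C0
  generalize (g - 2 * (((n + 1) / 10 : Nat) : Int) + 5 * (((n + 1) / 15 : Nat) : Int)) = C
  simp only [Prod.mk.injEq, PySem.Int.mod_eq_zero_iff_dvd, and_true]
  split_ifs <;> omega

lemma pvFoldA (n : Nat) (g : Int) :
    (PySem.List.pyRange 1 ((n : Int) + 1)).foldl pvStepA (0, g)
      = (pvCoinsR n g, pvCompF n g) := by
  induction n with
  | zero => simp [PySem.List.pyRange, pvCoinsR, pvCompF]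
  | succ n ih =>
    rw [show ((n + 1 : Nat) : Int) + 1 = ((n : Int) + 1) + 1 by push_cast; ring,
      PySem.List.pyRange_one_succ_right (by omega), List.foldl_append, ih]
    simpa using pvStepA_eq n g

lemma pvFoldB (r : Nat) (K g c0 : Int) :
    (PySem.List.pyRange 1 ((r : Int) + 1)).foldl
      (fun c j => c + pvCoeffB j *
        (g + 4 * K - 2 * PySem.Int.floordiv j 10 + 5 * PySem.Int.floordiv j 15)) c0
      = c0 + pvRsum r K g := by
  induction r with
  | zero => simp [PySem.List.pyRange, pvRsum]
  | succ r ih =>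
    rw [show ((r + 1 : Nat) : Int) + 1 = ((r : Int) + 1) + 1 by push_cast; ring,
      PySem.List.pyRange_one_succ_right (by omega), List.foldl_append, ih]
    have h10 : PySem.Int.floordiv ((r : Int) + 1) 10 = (((r + 1) / 10 : Nat) : Int) := by
      rw [PySem.Int.floordiv_eq_ediv_of_pos (by norm_num)]; omega
    have h15 : PySem.Int.floordiv ((r : Int) + 1) 15 = (((r + 1) / 15 : Nat) : Int) := by
      rw [PySem.Int.floordiv_eq_ediv_of_pos (by norm_num)]; omega
    rw [pvRsum]
    simp only [List.foldl_cons, List.foldl_nil, h10, h15]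
    ring

lemma pvRsum29 (K g : Int) : pvRsum 29 K g = 13 * (g + 4 * K) + 3 := by
  norm_num [pvRsum, pvCoeffB, PySem.Int.mod_eq_zero_iff_dvd]
  ring

-- the closed form B computes equals the recursion A performs
lemma pvClosed (n : Nat) (g : Int) :
    pvCoinsR n g = 50 * (n : Int) + ((n / 30 : Nat) : Int) * (26 * g + 55)
      + 2 * 26 * ((n / 30 : Nat) : Int) * (((n / 30 : Nat) : Int) - 1)
      + pvRsum (n % 30) ((n / 30 : Nat) : Int) g := by
  induction n with
  | zero => simp [pvCoinsR, pvRsum]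
  | succ n ih =>
    rw [pvCoinsR, ih]
    by_cases hr : n % 30 = 29
    · obtain ⟨K, hK⟩ : ∃ K, n / 30 = K := ⟨n / 30, rfl⟩
      have hn : n = 30 * K + 29 := by omega
      have hco : pvCoeffB ((n : Int) + 1) = 13 := by
        rw [pvCoeffB_congr ((n : Int) + 1) 30 (by omega) (by omega)]; decide
      have e0 : (n + 1) % 30 = 0 := by omega
      have e1 : (n + 1) / 30 = K + 1 := by omega
      have e2 : (n + 1) / 10 = 3 * K + 3 := by omega
      have e3 : (n + 1) / 15 = 2 * K + 2 := by omega
      rw [hr, hK, e0, e1, hco, pvRsum29]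
      unfold pvCompF
      rw [e2, e3, pvRsum, hn]
      push_cast
      ring
    · have e0 : (n + 1) % 30 = n % 30 + 1 := by omega
      have e1 : (n + 1) / 30 = n / 30 := by omega
      have hco : pvCoeffB ((n : Int) + 1) = pvCoeffB (((n % 30 : Nat) : Int) + 1) :=
        pvCoeffB_congr _ _ (by omega) (by omega)
      have hcomp : pvCompF (n + 1) g = g + 4 * ((n / 30 : Nat) : Int)
          - 2 * (((n % 30 + 1) / 10 : Nat) : Int) + 5 * (((n % 30 + 1) / 15 : Nat) : Int) := by
        unfold pvCompF; push_cast; omega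
      rw [e0, e1, pvRsum, hco, hcomp]
      push_cast
      ring

-- ===== VERDICT (by name: the statement is the Claim_ definition above) =====
theorem calculate_coins_spec : Claim_equal_calculate_coins := by
  unfold Claim_equal_calculate_coins
  intro g days _ _
  unfold Spec_calculate_coins calculate_coins calculate_coins_alt
  by_cases h : days > 0
  · obtain ⟨N, rfl⟩ : ∃ N : Nat, days = (N : Int) :=
      ⟨days.toNat, (Int.toNat_of_nonneg (le_of_lt h)).symm⟩
    rw [if_pos h, pvFoldA]
    dsimp only
    have k30 : PySem.Int.floordiv ((N : Nat) : Int) 30 = ((N / 30 : Nat) : Int) := by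
      rw [PySem.Int.floordiv_eq_ediv_of_pos (by norm_num)]; omega
    have m30 : PySem.Int.mod ((N : Nat) : Int) 30 = ((N % 30 : Nat) : Int) := by
      rw [PySem.Int.mod_eq_emod_of_pos (by norm_num)]; omega
    have d10 : PySem.Int.floordiv ((N % 30 : Nat) : Int) 10 = ((N % 30 / 10 : Nat) : Int) := by
      rw [PySem.Int.floordiv_eq_ediv_of_pos (by norm_num)]; omega
    have d15 : PySem.Int.floordiv ((N % 30 : Nat) : Int) 15 = ((N % 30 / 15 : Nat) : Int) := by
      rw [PySem.Int.floordiv_eq_ediv_of_pos (by norm_num)]; omega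
    rw [m30, k30, d10, d15, pvFoldB, pvClosed]
    have hcomp : pvCompF N g = g + 4 * ((N / 30 : Nat) : Int)
        - 2 * ((N % 30 / 10 : Nat) : Int) + 5 * ((N % 30 / 15 : Nat) : Int) := by
      unfold pvCompF; omega
    rw [hcomp]
  · rw [if_neg h]
    have hA : PySem.List.pyRange 1 (days + 1) = [] := by
      simp [PySem.List.pyRange]; omega
    rw [hA]
    have e30 : PySem.Int.floordiv 0 30 = 0 := by decide
    have m30 : PySem.Int.mod 0 30 = 0 := by decide
    have e10 : PySem.Int.floordiv 0 10 = 0 := by decide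
    have e15 : PySem.Int.floordiv 0 15 = 0 := by decide
    have hB : PySem.List.pyRange 1 ((0 : Int) + 1) = [] := by decide
    simp only [e30, m30, e10, e15, hB, List.foldl_nil]
    norm_num
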